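-- pv_equiv track=rewrite | github.com/BillStark001/node_pn_sysid | utils/prune.py | strip_leading_spaces
-- ===== SOURCE A (Python) =====
-- def strip_leading_spaces(source: str):
--   space_count = len(source) - len(source.lstrip(' \t'))
--   if space_count > 0:
--     source_splitted = [(
--         x[space_count:] if len(x) > space_count else ''
--     ) for x in source.split('\n')]
--     source = '\n'.join(source_splitted)
--   return source
-- ===== SOURCE B (Python) =====
-- def strip_leading_spaces(source: str):
--   # one streaming pass: count the leading indent, then emit chars while
--   # skipping up to that many chars after every line start
--   n = 0
--   while n < len(source) and source[n] in ' \t':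
--     n += 1
--   out = []
--   skip = n
--   for ch in source:
--     if ch == '\n':
--       out.append(ch)
--       skip = n
--     elif skip > 0:
--       skip -= 1
--     else:
--       out.append(ch)
--   return ''.join(out)
-- ===== Notes on version B (the rewrite author's own statement) =====
-- stated objective: alternative
-- what changed: Replaces splitting the text into lines, slicing each line and rejoining with a single streaming pass over the characters that keeps a per-line skip counter reset at each newline.
import Mathlib
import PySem

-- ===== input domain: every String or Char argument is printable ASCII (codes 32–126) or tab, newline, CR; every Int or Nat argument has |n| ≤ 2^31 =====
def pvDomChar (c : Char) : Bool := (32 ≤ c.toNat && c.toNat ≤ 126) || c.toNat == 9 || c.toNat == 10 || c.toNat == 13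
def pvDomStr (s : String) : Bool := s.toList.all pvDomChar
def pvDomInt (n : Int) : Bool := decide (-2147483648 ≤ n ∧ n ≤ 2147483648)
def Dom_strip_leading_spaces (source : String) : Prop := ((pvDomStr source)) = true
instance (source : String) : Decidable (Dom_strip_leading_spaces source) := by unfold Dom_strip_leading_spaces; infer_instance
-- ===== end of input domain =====

-- B replaces A's split-lines / per-line-slice / join pipeline by a single streaming pass with a per-line skip counter (alternative decomposition, same cost).

-- ===== PORT A =====
-- lstrip(' \t') ported by hand as dropWhile over the two characters (exact for every string)
def strip_leading_spaces (source : String) : String :=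
  let space_count : Int :=
    PySem.Str.len source - ((source.toList.dropWhile (fun c => c == ' ' || c == '\t')).length : Int)
  if space_count > 0 then
    let source_splitted : List (List Char) :=
      (PySem.Chars.splitOn source.toList ['\n']).map
        (fun x => if (x.length : Int) > space_count then PySem.Chars.slice x (some space_count) none else [])
    String.ofList (PySem.Chars.join ['\n'] source_splitted)
  else source

-- ===== PORT B =====
-- the initial while loop of Source B: count the leading ' '/'\t' characters
def altCountLead : List Char → Nat
  | [] => 0
  | c :: cs => if c = ' ' ∨ c = '\t' then altCountLead cs + 1 else 0

-- the main for loop of Source B: emit chars, skipping up to `skip` chars per line, reset to n at '\n'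
def altSkip (n : Nat) : Nat → List Char → List Char
  | _, [] => []
  | skip, c :: cs =>
    if c = '\n' then c :: altSkip n n cs
    else if skip > 0 then altSkip n (skip - 1) cs
    else c :: altSkip n skip cs

def strip_leading_spaces_alt (source : String) : String :=
  let n := altCountLead source.toList
  String.ofList (altSkip n n source.toList)

-- ===== PRECONDITION & SPEC =====
def Spec_strip_leading_spaces (source : String) (out : String) : Prop := out = strip_leading_spaces_alt source
instance (source : String) (out : String) : Decidable (Spec_strip_leading_spaces source out) := by unfold Spec_strip_leading_spaces; infer_instance

-- ===== CLAIM (what is proved, stated in full; the proofs are below) =====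
def Claim_equal_strip_leading_spaces : Prop := ∀ (source : String), Dom_strip_leading_spaces source → Spec_strip_leading_spaces source (strip_leading_spaces source)

-- ===== LEMMAS AND PROOFS =====

-- proof-only helper: the '\n'-separated segments of cs (what Python's split('\n') returns)
def pvLines : List Char → List (List Char)
  | [] => [[]]
  | c :: cs =>
    if c = '\n' then [] :: pvLines cs
    else
      match pvLines cs with
      | h :: t => (c :: h) :: t
      | [] => [[c]]

-- proof-only helper: join with '\n'
def pvJoinN : List (List Char) → List Char
  | [] => []
  | h :: t => h ++ t.flatMap (fun l => '\n' :: l)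

lemma pvLines_ne_nil (cs : List Char) : pvLines cs ≠ [] := by
  cases cs with
  | nil => simp [pvLines]
  | cons c cs =>
    simp only [pvLines]
    split
    · simp
    · cases h : pvLines cs <;> simp

lemma splitOn_go_eq : ∀ (l : List Char) (fuel : Nat), l.length ≤ fuel →
    ∀ (cur : List Char) (acc : List (List Char)),
    PySem.Chars.splitOn.go ['\n'] fuel l cur acc
      = acc.reverse ++ ((pvLines l).modifyHead (cur.reverse ++ ·)) := by
  intro l
  induction l with
  | nil =>
    intro fuel _ cur acc
    rw [PySem.Chars.splitOn.go.eq_def]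
    cases fuel <;> simp [pvLines]
  | cons c rest ih =>
    intro fuel hf cur acc
    simp only [List.length_cons] at hf
    obtain ⟨f, rfl⟩ : ∃ f, fuel = f + 1 := ⟨fuel - 1, by omega⟩
    rw [PySem.Chars.splitOn.go.eq_def]
    by_cases hc : c = '\n'
    · subst hc
      simp only [List.isPrefixOf, beq_self_eq_true, Bool.true_and,
        if_pos, List.length_singleton, List.drop_one, List.tail_cons]
      rw [ih f (by omega)]
      cases hr : pvLines rest <;> simp [pvLines, List.modifyHead, hr]
    · have hpre : (['\n'].isPrefixOf (c :: rest)) = false := by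
        simp [List.isPrefixOf]; exact fun h => (hc h.symm).elim
      simp only [hpre, Bool.false_eq_true, if_false]
      rw [ih f (by omega)]
      have hne := pvLines_ne_nil rest
      cases hr : pvLines rest with
      | nil => exact absurd hr hne
      | cons h t =>
        simp [pvLines, hc, hr, List.modifyHead]

lemma splitOn_eq (cs : List Char) :
    PySem.Chars.splitOn cs ['\n'] = pvLines cs := by
  unfold PySem.Chars.splitOn
  rw [splitOn_go_eq cs (cs.length + 1) (by omega)]
  cases h : pvLines cs <;> simp [List.modifyHead]

lemma join_eq : ∀ (ls : List (List Char)), PySem.Chars.join ['\n'] ls = pvJoinN ls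
  | [] => by simp [PySem.Chars.join_nil, pvJoinN]
  | [h] => by simp [PySem.Chars.join_singleton, pvJoinN]
  | h :: h2 :: t => by
    rw [PySem.Chars.join_cons_cons, join_eq (h2 :: t)]
    simp [pvJoinN, List.flatMap]

lemma joinN_lines (cs : List Char) : pvJoinN (pvLines cs) = cs := by
  induction cs with
  | nil => simp [pvLines, pvJoinN]
  | cons c cs ih =>
    by_cases hc : c = '\n'
    · subst hc
      simp only [pvLines, if_pos rfl, pvJoinN, List.nil_append]
      cases hr : pvLines cs with
      | nil => exact absurd hr (pvLines_ne_nil cs)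
      | cons h t =>
        rw [hr] at ih
        simp only [pvJoinN] at ih
        rw [← ih]; simp [List.flatMap]
    · cases hr : pvLines cs with
      | nil => exact absurd hr (pvLines_ne_nil cs)
      | cons h t =>
        rw [hr] at ih
        simp only [pvJoinN] at ih ⊢
        simp [pvLines, hc, hr, pvJoinN, ih]

-- proof-only helper: head segment loses `skip` chars, later segments lose `n`
def pvDropHead (skip n : Nat) : List (List Char) → List (List Char)
  | [] => []
  | h :: t => h.drop skip :: t.map (List.drop n)

lemma altSkip_eq (n : Nat) : ∀ (cs : List Char) (skip : Nat),
    altSkip n skip cs = pvJoinN (pvDropHead skip n (pvLines cs)) := by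
  intro cs
  induction cs with
  | nil => intro skip; simp [altSkip, pvLines, pvDropHead, pvJoinN]
  | cons c cs ih =>
    intro skip
    by_cases hc : c = '\n'
    · subst hc
      simp only [altSkip, if_pos rfl, pvLines]
      rw [ih n]
      cases hr : pvLines cs with
      | nil => exact absurd hr (pvLines_ne_nil cs)
      | cons h t => simp [hr, pvDropHead, pvJoinN, List.flatMap]
    · cases hr : pvLines cs with
      | nil => exact absurd hr (pvLines_ne_nil cs)
      | cons h t =>
        cases skip with
        | zero =>
          simp only [altSkip, if_neg hc]
          rw [ih 0]
          simp [pvLines, hc, hr, pvDropHead, pvJoinN]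
        | succ s =>
          simp only [altSkip, if_neg hc, Nat.succ_sub_one]
          rw [if_pos (Nat.succ_pos s)]
          rw [ih s]
          simp [pvLines, hc, hr, pvDropHead, pvJoinN]

lemma countLead_eq_takeWhile (cs : List Char) :
    altCountLead cs = (cs.takeWhile (fun c => c == ' ' || c == '\t')).length := by
  induction cs with
  | nil => simp [altCountLead]
  | cons c cs ih =>
    by_cases h : c = ' ' ∨ c = '\t'
    · have hb : (c == ' ' || c == '\t') = true := by
        rcases h with h | h <;> simp [h]
      simp [altCountLead, h, List.takeWhile, hb, ih]
    · have hb : (c == ' ' || c == '\t') = false := by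
        rcases not_or.mp h with ⟨h1, h2⟩; simp [h1, h2]
      simp [altCountLead, h, List.takeWhile, hb]

lemma takeWhile_add_dropWhile_length (p : Char → Bool) (cs : List Char) :
    (cs.takeWhile p).length + (cs.dropWhile p).length = cs.length := by
  induction cs with
  | nil => simp
  | cons c cs ih =>
    by_cases h : p c <;> simp [List.takeWhile, List.dropWhile, h, ih] <;> omega

lemma pvDropHead_zero (ls : List (List Char)) : pvDropHead 0 0 ls = ls := by
  cases ls with
  | nil => simp [pvDropHead]
  | cons a t =>
    have ht : List.map (List.drop 0) t = t := by induction t <;> simp_all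
    simp [pvDropHead, ht]

lemma pvDropHead_same (n : Nat) (ls : List (List Char)) (h : ls ≠ []) :
    pvDropHead n n ls = ls.map (List.drop n) := by
  cases ls with
  | nil => exact absurd rfl h
  | cons a t => simp [pvDropHead]

-- ===== VERDICT (by name: the statement is the Claim_ definition above) =====
theorem strip_leading_spaces_spec : Claim_equal_strip_leading_spaces := by
  intro source _
  unfold Spec_strip_leading_spaces strip_leading_spaces strip_leading_spaces_alt
  set cs := source.toList with hcs
  set p : Char → Bool := fun c => c == ' ' || c == '\t' with hp
  set n : Nat := altCountLead cs with hn
  have hcnt : n = (cs.takeWhile p).length := by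
    rw [hn, hp]; exact countLead_eq_takeWhile cs
  have hsum := takeWhile_add_dropWhile_length p cs
  have hlen : (cs.dropWhile p).length = cs.length - n := by omega
  have hsc : PySem.Str.len source - ((cs.dropWhile p).length : Int) = (n : Int) := by
    rw [PySem.Str.len_eq, ← hcs, hlen]
    omega
  simp only [hsc]
  by_cases hpos : (n : Int) > 0
  · rw [if_pos hpos]
    rw [splitOn_eq, join_eq, altSkip_eq]
    rw [pvDropHead_same n _ (pvLines_ne_nil cs)]
    congr 1
    congr 1
    apply List.map_congr_left
    intro x _
    by_cases hx : (x.length : Int) > (n : Int)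
    · rw [if_pos hx]
      simp only [PySem.Chars.slice_eq_listSlice]
      exact PySem.List.slice_from_natCast x n
    · rw [if_neg hx]
      have : x.length ≤ n := by omega
      simp [List.drop_eq_nil_of_le this]
  · rw [if_neg hpos]
    have hn0 : n = 0 := by omega
    rw [altSkip_eq, hn0, pvDropHead_zero, joinN_lines, hcs, String.ofList_toList]
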